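-- pv_equiv track=rewrite | github.com/santiblaumann/discordSnipeBot | bot.py | multi_kill_msg
-- ===== SOURCE A (Python) =====
-- def multi_kill_msg(sniper, snipees, killcount, h2h, deaths, sniper_killstreak, snapped):
--     # TODO: Add an update to sniper killstreak, as it will change.
--     intro = "Oh baby a triple!" if (len(snipees) == 3) else "Multisnipe!"
--     obituary = (f"{sniper} has sniped ")  # lists kills
--     death = ''
--     snaplist = ''
--     # generate informative part of kill message
--     for x in range(len(snipees)):
--         time = "time" if (h2h[x] <= 1) else "times"
--         obituary += f"{snipees[x]} {h2h[x]} {time}, " + ("and " if x == (len(snipees) - 2) else '')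
--         time = "time" if (int(deaths[x]) <= 1) else "times"
--         death += (f"{snipees[x]} has been sniped {deaths[x]} {time}. ")
--         snaplist += (f"{snipees[x]} had their killstreak of {snapped[x]} snapped. ") if snapped[x] > 1 else ''
--         pass
--     obituary = obituary[:-2] + '.'
--     killstreak = (f"{sniper} now has a killstreak of {sniper_killstreak}.")
--     return (f"""{intro} {sniper} has sniped {readable_list(snipees)}.\n{sniper} has {killcount} snipes.\n{obituary}\n{death}\n{snaplist}\n{killstreak}""")
--
-- def readable_list(s):
--   if len(s) < 3:
--     return ' and '.join(map(str, s))
--   *a, b = s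
--   return f"{', '.join(map(str, a))}, and {b}"
-- ===== SOURCE B (Python) =====
-- def readable_list(s):
--   if len(s) < 3:
--     return ' and '.join(map(str, s))
--   *a, b = s
--   return f"{', '.join(map(str, a))}, and {b}"
--
-- def multi_kill_msg(sniper, snipees, killcount, h2h, deaths, sniper_killstreak, snapped):
--     # Each section of the message is computed in its own pass instead of one fused index loop.
--     intro = "Oh baby a triple!" if len(snipees) == 3 else "Multisnipe!"
--     n = len(snipees)
--     kills = [f"{snipees[i]} {h2h[i]} " + ("time" if h2h[i] <= 1 else "times")
--              for i in range(n)]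
--     if len(kills) <= 1:
--         listing = "".join(kills)
--     else:
--         listing = ", ".join(kills[:-1]) + ", and " + kills[-1]
--     obituary = f"{sniper} has sniped {listing}."
--     death = "".join(f"{snipees[i]} has been sniped {deaths[i]} "
--                     + ("time" if int(deaths[i]) <= 1 else "times") + ". "
--                     for i in range(n))
--     snaplist = "".join(f"{snipees[i]} had their killstreak of {snapped[i]} snapped. "
--                        for i in range(n) if snapped[i] > 1)
--     killstreak = f"{sniper} now has a killstreak of {sniper_killstreak}."
--     return f"""{intro} {sniper} has sniped {readable_list(snipees)}.\n{sniper} has {killcount} snipes.\n{obituary}\n{death}\n{snaplist}\n{killstreak}"""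
-- ===== Notes on version B (the rewrite author's own statement) =====
-- stated objective: simpler
-- what changed: B computes each message section in its own pass (a list of per-kill strings assembled comma/'and'-style, a ''.join for the death lines, a ''.join over the filtered snapped entries) instead of A's single fused index loop that grows three accumulator strings and then trims the obituary's trailing ', ' by slicing.
-- intended difference: On empty snipees A's obituary[:-2] trim eats the final 'd ' of 'has sniped ', so A returns '... has snipe.' while B returns the intact '... has sniped .', which is the intended sentence. — e.g. on multi_kill_msg("s", [], 1, [], [], 2, []): A returns "Multisnipe! s has sniped .\ns has 1 snipes.\ns has snipe.\n\n\ns now has a killstreak of 2.", B returns "Multisnipe! s has sniped .\ns has 1 snipes.\ns has sniped .\n\n\ns now has a killstreak of 2."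
import Mathlib
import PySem

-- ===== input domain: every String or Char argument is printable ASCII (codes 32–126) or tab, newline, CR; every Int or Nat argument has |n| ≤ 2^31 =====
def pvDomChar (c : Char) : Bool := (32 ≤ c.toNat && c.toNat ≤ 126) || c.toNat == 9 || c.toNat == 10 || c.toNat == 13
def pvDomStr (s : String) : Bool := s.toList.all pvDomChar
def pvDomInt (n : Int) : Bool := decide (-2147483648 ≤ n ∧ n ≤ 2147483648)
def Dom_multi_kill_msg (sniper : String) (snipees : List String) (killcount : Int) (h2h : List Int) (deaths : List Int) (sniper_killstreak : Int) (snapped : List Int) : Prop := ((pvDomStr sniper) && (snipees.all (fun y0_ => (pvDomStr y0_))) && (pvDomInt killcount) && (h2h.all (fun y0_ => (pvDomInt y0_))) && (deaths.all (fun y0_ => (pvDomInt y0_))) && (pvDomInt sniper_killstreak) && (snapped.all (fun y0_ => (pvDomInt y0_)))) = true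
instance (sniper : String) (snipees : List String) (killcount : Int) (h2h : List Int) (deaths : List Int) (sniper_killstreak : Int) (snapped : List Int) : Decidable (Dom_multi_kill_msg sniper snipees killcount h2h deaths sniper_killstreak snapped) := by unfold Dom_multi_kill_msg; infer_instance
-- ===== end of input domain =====

-- B rebuilds the message section by section (obituary list, death list, snap list each in its own
-- pass) instead of A's fused index loop; on empty snipees B keeps the word "sniped" intact where
-- A's [:-2] trim eats it (see D_ below). Objective: simpler decomposition, same cost.

-- ===== PORT A =====
-- shared Python module helper readable_list (called by both A and B)
def readable_list (s : List String) : String :=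
  if s.length < 3 then PySem.Str.join " and " s
  else PySem.Str.join ", " s.dropLast ++ ", and " ++ PySem.List.pyGetD s (-1) ""

def multi_kill_msg (sniper : String) (snipees : List String) (killcount : Int) (h2h : List Int) (deaths : List Int) (sniper_killstreak : Int) (snapped : List Int) : String :=
  let intro := if snipees.length == 3 then "Oh baby a triple!" else "Multisnipe!"
  let n : Int := (snipees.length : Int)
  -- one fused loop over the indices, growing obituary / death / snaplist together
  let st := (PySem.List.pyRange 0 n 1).foldl (fun (st : String × String × String) x =>
      (st.1 ++ ((PySem.List.pyGetD snipees x "" ++ " " ++ PySem.Int.toStr (PySem.List.pyGetD h2h x 0) ++ " " ++ (if PySem.List.pyGetD h2h x 0 ≤ 1 then "time" else "times") ++ ", ") ++ (if x == n - 2 then "and " else "")),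
       st.2.1 ++ (PySem.List.pyGetD snipees x "" ++ " has been sniped " ++ PySem.Int.toStr (PySem.List.pyGetD deaths x 0) ++ " " ++ (if PySem.List.pyGetD deaths x 0 ≤ 1 then "time" else "times") ++ ". "),
       st.2.2 ++ (if PySem.List.pyGetD snapped x 0 > 1 then PySem.List.pyGetD snipees x "" ++ " had their killstreak of " ++ PySem.Int.toStr (PySem.List.pyGetD snapped x 0) ++ " snapped. " else "")))
    (sniper ++ " has sniped ", "", "")
  let obituary := PySem.Str.slice st.1 none (some (-2)) ++ "."
  let killstreak := sniper ++ " now has a killstreak of " ++ PySem.Int.toStr sniper_killstreak ++ "."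
  intro ++ " " ++ sniper ++ " has sniped " ++ readable_list snipees ++ ".\n" ++ sniper ++ " has " ++ PySem.Int.toStr killcount ++ " snipes.\n" ++ obituary ++ "\n" ++ st.2.1 ++ "\n" ++ st.2.2 ++ "\n" ++ killstreak

-- ===== PORT B =====
def multi_kill_msg_alt (sniper : String) (snipees : List String) (killcount : Int) (h2h : List Int) (deaths : List Int) (sniper_killstreak : Int) (snapped : List Int) : String :=
  let intro := if snipees.length == 3 then "Oh baby a triple!" else "Multisnipe!"
  let n : Int := (snipees.length : Int)
  -- each section in its own pass
  let kills := (PySem.List.pyRange 0 n 1).map (fun i => PySem.List.pyGetD snipees i "" ++ " " ++ PySem.Int.toStr (PySem.List.pyGetD h2h i 0) ++ " " ++ (if PySem.List.pyGetD h2h i 0 ≤ 1 then "time" else "times"))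
  let listing := if kills.length ≤ 1 then PySem.Str.join "" kills
    else PySem.Str.join ", " (PySem.List.slice kills none (some (-1))) ++ ", and " ++ PySem.List.pyGetD kills (-1) ""
  let obituary := sniper ++ " has sniped " ++ listing ++ "."
  let death := PySem.Str.join "" ((PySem.List.pyRange 0 n 1).map (fun i => PySem.List.pyGetD snipees i "" ++ " has been sniped " ++ PySem.Int.toStr (PySem.List.pyGetD deaths i 0) ++ " " ++ (if PySem.List.pyGetD deaths i 0 ≤ 1 then "time" else "times") ++ ". "))
  let snaplist := PySem.Str.join "" (((PySem.List.pyRange 0 n 1).filter (fun i => PySem.List.pyGetD snapped i 0 > 1)).map (fun i => PySem.List.pyGetD snipees i "" ++ " had their killstreak of " ++ PySem.Int.toStr (PySem.List.pyGetD snapped i 0) ++ " snapped. "))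
  let killstreak := sniper ++ " now has a killstreak of " ++ PySem.Int.toStr sniper_killstreak ++ "."
  intro ++ " " ++ sniper ++ " has sniped " ++ readable_list snipees ++ ".\n" ++ sniper ++ " has " ++ PySem.Int.toStr killcount ++ " snipes.\n" ++ obituary ++ "\n" ++ death ++ "\n" ++ snaplist ++ "\n" ++ killstreak

-- ===== PRECONDITION & SPEC =====
-- Pre_ excludes exactly the inputs where Python A raises IndexError: h2h / deaths / snapped
-- shorter than snipees.
def Pre_multi_kill_msg (sniper : String) (snipees : List String) (killcount : Int) (h2h : List Int) (deaths : List Int) (sniper_killstreak : Int) (snapped : List Int) : Prop :=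
  snipees.length ≤ h2h.length ∧ snipees.length ≤ deaths.length ∧ snipees.length ≤ snapped.length
instance (sniper : String) (snipees : List String) (killcount : Int) (h2h : List Int) (deaths : List Int) (sniper_killstreak : Int) (snapped : List Int) : Decidable (Pre_multi_kill_msg sniper snipees killcount h2h deaths sniper_killstreak snapped) := by unfold Pre_multi_kill_msg; infer_instance
def pvWitness_multi_kill_msg : String × List String × Int × List Int × List Int × Int × List Int :=
  ("s", ["al", "bob"], 5, [1, 2], [0, 3], 2, [0, 5])

-- On empty snipees A's obituary[:-2] trim eats the final "d " of "has sniped ", so A returns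
-- "... has snipe." while B returns the intact "... has sniped ."; B's is the intended sentence.
def D_multi_kill_msg (sniper : String) (snipees : List String) (killcount : Int) (h2h : List Int) (deaths : List Int) (sniper_killstreak : Int) (snapped : List Int) : Prop := snipees = []
instance (sniper : String) (snipees : List String) (killcount : Int) (h2h : List Int) (deaths : List Int) (sniper_killstreak : Int) (snapped : List Int) : Decidable (D_multi_kill_msg sniper snipees killcount h2h deaths sniper_killstreak snapped) := by unfold D_multi_kill_msg; infer_instance

def Spec_multi_kill_msg (sniper : String) (snipees : List String) (killcount : Int) (h2h : List Int) (deaths : List Int) (sniper_killstreak : Int) (snapped : List Int) (out : String) : Prop := ¬ D_multi_kill_msg sniper snipees killcount h2h deaths sniper_killstreak snapped → out = multi_kill_msg_alt sniper snipees killcount h2h deaths sniper_killstreak snapped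
instance (sniper : String) (snipees : List String) (killcount : Int) (h2h : List Int) (deaths : List Int) (sniper_killstreak : Int) (snapped : List Int) (out : String) : Decidable (Spec_multi_kill_msg sniper snipees killcount h2h deaths sniper_killstreak snapped out) := by unfold Spec_multi_kill_msg; infer_instance

def pvDiffWitness_multi_kill_msg : String × List String × Int × List Int × List Int × Int × List Int :=
  ("s", [], 1, [], [], 2, [])
def pvDiffWitnessOut_multi_kill_msg : String × String :=
  ("Multisnipe! s has sniped .\ns has 1 snipes.\ns has snipe.\n\n\ns now has a killstreak of 2.",
   "Multisnipe! s has sniped .\ns has 1 snipes.\ns has sniped .\n\n\ns now has a killstreak of 2.")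

-- ===== CLAIM (what is proved, stated in full; the proofs are below) =====
def Claim_unchanged_multi_kill_msg : Prop := ∀ (sniper : String) (snipees : List String) (killcount : Int) (h2h : List Int) (deaths : List Int) (sniper_killstreak : Int) (snapped : List Int), Dom_multi_kill_msg sniper snipees killcount h2h deaths sniper_killstreak snapped → Pre_multi_kill_msg sniper snipees killcount h2h deaths sniper_killstreak snapped → Spec_multi_kill_msg sniper snipees killcount h2h deaths sniper_killstreak snapped (multi_kill_msg sniper snipees killcount h2h deaths sniper_killstreak snapped)
def Claim_changed_multi_kill_msg : Prop := Dom_multi_kill_msg (pvDiffWitness_multi_kill_msg.1) (pvDiffWitness_multi_kill_msg.2.1) (pvDiffWitness_multi_kill_msg.2.2.1) (pvDiffWitness_multi_kill_msg.2.2.2.1) (pvDiffWitness_multi_kill_msg.2.2.2.2.1) (pvDiffWitness_multi_kill_msg.2.2.2.2.2.1) (pvDiffWitness_multi_kill_msg.2.2.2.2.2.2) ∧ Pre_multi_kill_msg (pvDiffWitness_multi_kill_msg.1) (pvDiffWitness_multi_kill_msg.2.1) (pvDiffWitness_multi_kill_msg.2.2.1) (pvDiffWitness_multi_kill_msg.2.2.2.1)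 (pvDiffWitness_multi_kill_msg.2.2.2.2.1) (pvDiffWitness_multi_kill_msg.2.2.2.2.2.1) (pvDiffWitness_multi_kill_msg.2.2.2.2.2.2) ∧ D_multi_kill_msg (pvDiffWitness_multi_kill_msg.1) (pvDiffWitness_multi_kill_msg.2.1) (pvDiffWitness_multi_kill_msg.2.2.1) (pvDiffWitness_multi_kill_msg.2.2.2.1) (pvDiffWitness_multi_kill_msg.2.2.2.2.1) (pvDiffWitness_multi_kill_msg.2.2.2.2.2.1) (pvDiffWitness_multi_kill_msg.2.2.2.2.2.2) ∧ multi_kill_msg (pvDiffWitness_multi_kill_msg.1) (pvDiffWitness_multi_kill_msg.2.1) (pvDiffWitness_multi_kill_msg.2.2.1) (pvDiffWitness_multi_kill_msg.2.2.2.1) (pvDiffWitness_multi_kill_msg.2.2.2.2.1) (pvDiffWitness_multi_kill_msg.2.2.2.2.2.1) (pvDiffWitness_multi_kill_msg.2.2.2.2.2.2) = pvDiffWitnessOut_multi_kill_msg.1 ∧ multi_kill_msg_alt (pvDiffWitness_multi_kill_msg.1) (pvDiffWitness_multi_kill_msg.2.1) (pvDiffWitness_multi_kill_msg.2.2.1)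 (pvDiffWitness_multi_kill_msg.2.2.2.1) (pvDiffWitness_multi_kill_msg.2.2.2.2.1) (pvDiffWitness_multi_kill_msg.2.2.2.2.2.1) (pvDiffWitness_multi_kill_msg.2.2.2.2.2.2) = pvDiffWitnessOut_multi_kill_msg.2 ∧ pvDiffWitnessOut_multi_kill_msg.1 ≠ pvDiffWitnessOut_multi_kill_msg.2

def Claim_exact_multi_kill_msg : Prop := ∀ (sniper : String) (snipees : List String) (killcount : Int) (h2h : List Int) (deaths : List Int) (sniper_killstreak : Int) (snapped : List Int), Dom_multi_kill_msg sniper snipees killcount h2h deaths sniper_killstreak snapped → Pre_multi_kill_msg sniper snipees killcount h2h deaths sniper_killstreak snapped → D_multi_kill_msg sniper snipees killcount h2h deaths sniper_killstreak snapped → multi_kill_msg sniper snipees killcount h2h deaths sniper_killstreak snapped ≠ multi_kill_msg_alt sniper snipees killcount h2h deaths sniper_killstreak snapped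

-- ===== LEMMAS AND PROOFS =====

-- B's obituary listing, as a standalone function of the per-kill strings
def pvListing (ks : List String) : String :=
  if ks.length ≤ 1 then PySem.Str.join "" ks
  else PySem.Str.join ", " ks.dropLast ++ ", and " ++ PySem.List.pyGetD ks (-1) ""

theorem pv_join_nil (sep : String) : PySem.Str.join sep [] = "" := by
  apply String.toList_inj.mp
  simp [PySem.Str.toList_join, PySem.Chars.join, List.intercalate]

theorem pv_join_single (sep x : String) : PySem.Str.join sep [x] = x := by
  apply String.toList_inj.mp
  simp [PySem.Str.toList_join, PySem.Chars.join, List.intercalate, List.intersperse_single]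

theorem pv_sjoin_cons (x : String) (xs : List String) :
    PySem.Str.join "" (x :: xs) = x ++ PySem.Str.join "" xs := by
  cases xs with
  | nil => simp [pv_join_nil, pv_join_single]
  | cons y ys =>
    apply String.toList_inj.mp
    simp [PySem.Str.toList_join, PySem.Chars.join, List.intercalate, List.intersperse_cons₂]

theorem pv_join_cons_ne (sep x : String) (l : List String) (h : l ≠ []) :
    PySem.Str.join sep (x :: l) = x ++ sep ++ PySem.Str.join sep l := by
  cases l with
  | nil => exact absurd rfl h
  | cons y ys =>
    apply String.toList_inj.mp
    simp [PySem.Str.toList_join, PySem.Chars.join, List.intercalate, List.intersperse_cons₂,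
      String.toList_append]

theorem pv_sjoin_map_if (p : Int → Prop) [DecidablePred p] (f : Int → String) :
    ∀ (l : List Int),
      PySem.Str.join "" (l.map (fun x => if p x then f x else "")) =
        PySem.Str.join "" ((l.filter (fun x => decide (p x))).map f) := by
  intro l
  induction l with
  | nil => simp
  | cons x xs ih =>
    by_cases hx : p x
    · simp [hx, pv_sjoin_cons, ih]
    · simp [hx, pv_sjoin_cons, ih]

theorem pv_slice_neg2_append (b x : String) :
    PySem.Str.slice (b ++ (x ++ ", ")) none (some (-2)) = b ++ x := by
  apply String.toList_inj.mp
  rw [PySem.Str.toList_slice]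
  have h2 : (", " : String).toList = [',', ' '] := by decide
  show PySem.List.slice ((b ++ (x ++ ", ")).toList) none (some (-2)) = (b ++ x).toList
  rw [String.toList_append, String.toList_append, h2,
    PySem.List.slice_to_neg_ofNat _ 2 (by omega)]
  simp [← List.append_assoc]

theorem pv_listing_pair (x y : String) :
    pvListing [x, y] = x ++ ", and " ++ y := by
  simp [pvListing, pv_join_single, PySem.List.pyGetD_neg_one ([x, y]) "" (by simp)]

theorem pv_listing_cons (x : String) (l : List String) (h : 2 ≤ l.length) :
    pvListing (x :: l) = x ++ ", " ++ pvListing l := by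
  have hne : l ≠ [] := by intro e; subst e; simp at h
  have hdne : l.dropLast ≠ [] := by
    intro e
    have := congrArg List.length e
    simp at this
    omega
  rw [pvListing, pvListing, if_neg (by simp; omega), if_neg (by omega)]
  rw [List.dropLast_cons_of_ne_nil hne, pv_join_cons_ne _ _ _ hdne]
  rw [PySem.List.pyGetD_neg_one (x :: l) "" (by simp), PySem.List.pyGetD_neg_one l "" hne]
  rw [List.getLast_cons hne]
  simp [String.append_assoc]

theorem pv_foldl_split (F G H : Int → String) :
    ∀ (l : List Int) (a b c : String),
      l.foldl (fun (st : String × String × String) x => (st.1 ++ F x, st.2.1 ++ G x, st.2.2 ++ H x)) (a, b, c) =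
        (a ++ PySem.Str.join "" (l.map F), b ++ PySem.Str.join "" (l.map G), c ++ PySem.Str.join "" (l.map H)) := by
  intro l
  induction l with
  | nil => intro a b c; simp [pv_join_nil]
  | cons x xs ih =>
    intro a b c
    simp only [List.foldl_cons, List.map_cons, pv_sjoin_cons, ih, String.append_assoc]

theorem pv_obit_concat (k : Int → String) :
    ∀ (d : Nat) (s e : Int), e = s + d → s < e →
      PySem.Str.join "" ((PySem.List.pyRange s e 1).map
          (fun i => (k i ++ ", ") ++ (if i == e - 2 then "and " else ""))) =
        pvListing ((PySem.List.pyRange s e 1).map k) ++ ", " := by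
  intro d
  induction d with
  | zero => intro s e he hlt; omega
  | succ d ih =>
    intro s e he hlt
    rcases Nat.lt_or_ge d 2 with hd | hd
    · interval_cases d
      · obtain rfl : e = s + 1 := by omega
        rw [PySem.List.pyRange_one_singleton]
        simp [show s + 1 - 2 = s - 1 from by omega, show s ≠ s - 1 from by omega,
          pvListing, pv_join_single]
      · obtain rfl : e = s + 2 := by omega
        rw [PySem.List.pyRange_one_cons (by omega), PySem.List.pyRange_one_cons (by omega),
          PySem.List.pyRange_one_eq_nil (by omega)]
        simp [show s + 2 - 2 = s from by omega, show ¬ (s + 1 = s) from by omega,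
          pv_sjoin_cons, pv_join_nil, pv_listing_pair, String.append_assoc]
    · rw [PySem.List.pyRange_one_cons hlt]
      have ihs := ih (s + 1) e (by omega) (by omega)
      simp only [List.map_cons, pv_sjoin_cons, ihs,
        show (s == e - 2) = false from by simp; omega, Bool.false_eq_true, if_false]
      rw [pv_listing_cons _ _ (by simp [PySem.List.length_pyRange_one]; omega)]
      simp [String.append_assoc]

-- ===== VERDICT (by name: the statement is the Claim_ definition above) =====
theorem multi_kill_msg_spec : Claim_unchanged_multi_kill_msg := by
  intro sniper snipees killcount h2h deaths sniper_killstreak snapped _ _ hD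
  have hne : snipees ≠ [] := hD
  have hm : 1 ≤ snipees.length := by
    cases snipees with
    | nil => exact absurd rfl hne
    | cons a l => simp
  show multi_kill_msg sniper snipees killcount h2h deaths sniper_killstreak snapped =
    multi_kill_msg_alt sniper snipees killcount h2h deaths sniper_killstreak snapped
  simp only [multi_kill_msg, multi_kill_msg_alt]
  rw [pv_foldl_split]
  have hob := pv_obit_concat
    (fun i => PySem.List.pyGetD snipees i "" ++ " " ++ PySem.Int.toStr (PySem.List.pyGetD h2h i 0) ++ " " ++ (if PySem.List.pyGetD h2h i 0 ≤ 1 then "time" else "times"))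
    snipees.length 0 (snipees.length : Int) (by omega) (by omega)
  rw [hob]
  rw [pv_slice_neg2_append]
  rw [PySem.List.slice_to_neg_one]
  rw [pv_sjoin_map_if (fun x => PySem.List.pyGetD snapped x 0 > 1)]
  simp [pvListing, String.append_assoc]

theorem multi_kill_msg_changed : Claim_changed_multi_kill_msg := by
  unfold Claim_changed_multi_kill_msg; decide

theorem multi_kill_msg_tight : Claim_exact_multi_kill_msg := by
  intro sniper snipees killcount h2h deaths sniper_killstreak snapped _ _ hD hEq
  have h0 : snipees = [] := hD
  subst h0
  have hlen := congrArg PySem.Str.len hEq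
  simp only [multi_kill_msg, multi_kill_msg_alt, List.length_nil, Nat.cast_zero,
    PySem.List.pyRange_one_eq_nil (le_refl (0 : Int)), List.foldl_nil, List.map_nil,
    List.filter_nil, pv_join_nil,
    show ((0 : Nat) ≤ 1) = True from by simp, if_true] at hlen
  have hsl : PySem.Str.len (PySem.Str.slice (sniper ++ " has sniped ") none (some (-2)))
      = PySem.Str.len sniper + 10 := by
    rw [PySem.Str.len_eq, PySem.Str.len_eq, PySem.Str.toList_slice]
    show ((PySem.List.slice ((sniper ++ " has sniped ").toList) none (some (-2))).length : Int) = _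
    rw [String.toList_append, show (" has sniped " : String).toList =
      [' ','h','a','s',' ','s','n','i','p','e','d',' '] from by decide,
      PySem.List.slice_to_neg_ofNat _ 2 (by omega)]
    simp
  simp only [PySem.Str.len_append] at hlen
  rw [hsl, show PySem.Str.len " has sniped " = 12 from by decide,
    show PySem.Str.len "" = 0 from by decide] at hlen
  linarith
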